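-- pv_equiv track=rewrite | github.com/Threezh1/SiteCopy | sitecopy.py | IfBlackName
-- ===== SOURCE A (Python) =====
-- def IfBlackName(black_name_list, text, kind=1):
-- 	# 1: equal
-- 	# 2: exist
-- 	# 3: startswith
-- 	for temp in black_name_list:
-- 		if kind == 1:
-- 			if text == temp:
-- 				return True
-- 		if kind == 2:
-- 			if text.find(temp) != -1:
-- 				return True
-- 		if kind == 3:
-- 			if text.startswith(temp):
-- 				return True
-- 	return False
-- ===== SOURCE B (Python) =====
-- def IfBlackName(black_name_list, text, kind=1):
--     # Text-driven: index the blacklist in a set once, then enumerate the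
--     # candidate pieces of `text` (itself / its substrings / its prefixes)
--     # and test each for membership in the set.
--     blacklist = set(black_name_list)
--     n = len(text)
--     if kind == 1:
--         return text in blacklist
--     if kind == 2:
--         return any(text[i:j] in blacklist
--                    for i in range(n + 1) for j in range(i, n + 1))
--     if kind == 3:
--         return any(text[:i] in blacklist for i in range(n + 1))
--     return False
-- ===== Notes on version B (the rewrite author's own statement) =====
-- stated objective: alternative
-- what changed: Instead of scanning the blacklist and testing each entry against the text, B builds a set of the blacklist once and enumerates the candidate pieces of the text itself (the whole text / all of its substrings / all of its prefixes), testing each for set membership; the traversal is driven by the text, not the list.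
import Mathlib
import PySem

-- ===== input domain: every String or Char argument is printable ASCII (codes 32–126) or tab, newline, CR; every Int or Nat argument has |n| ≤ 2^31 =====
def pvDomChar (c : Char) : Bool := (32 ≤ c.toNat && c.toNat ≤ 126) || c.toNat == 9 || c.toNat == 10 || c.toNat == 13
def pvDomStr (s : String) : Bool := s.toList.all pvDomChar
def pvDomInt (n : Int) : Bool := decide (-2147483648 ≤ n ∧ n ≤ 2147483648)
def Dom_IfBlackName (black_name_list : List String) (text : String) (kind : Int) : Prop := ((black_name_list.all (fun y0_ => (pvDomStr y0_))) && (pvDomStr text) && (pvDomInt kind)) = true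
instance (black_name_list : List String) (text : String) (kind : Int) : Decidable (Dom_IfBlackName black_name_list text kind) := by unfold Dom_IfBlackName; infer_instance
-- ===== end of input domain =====

-- B replaces A's blacklist scan by a text-driven algorithm: index the blacklist in a set once,
-- then enumerate the candidate pieces of the text (substrings / prefixes) and test set membership
-- (objective: alternative; same return value everywhere, no speed claim).

-- ===== PORT A =====
def IfBlackName (black_name_list : List String) (text : String) (kind : Int) : Bool :=
  match black_name_list with
  | [] => false
  | temp :: rest =>
    if kind == 1 && text == temp then true
    else if kind == 2 && PySem.Str.find text temp != -1 then true
    else if kind == 3 && PySem.Str.startswith text temp then true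
    else IfBlackName rest text kind

-- ===== PORT B =====
def IfBlackName_alt (black_name_list : List String) (text : String) (kind : Int) : Bool :=
  let blacklist : PySem.Set String := PySem.Set.ofList black_name_list
  let n : Int := (text.toList.length : Int)
  if kind == 1 then PySem.Set.contains blacklist text
  else if kind == 2 then
    (PySem.List.pyRange 0 (n + 1) 1).any (fun i =>
      (PySem.List.pyRange i (n + 1) 1).any (fun j =>
        PySem.Set.contains blacklist
          (String.ofList (PySem.List.slice text.toList (some i) (some j)))))
  else if kind == 3 then
    (PySem.List.pyRange 0 (n + 1) 1).any (fun i =>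
      PySem.Set.contains blacklist
        (String.ofList (PySem.List.slice text.toList none (some i))))
  else false

-- ===== PRECONDITION & SPEC =====
def Spec_IfBlackName (black_name_list : List String) (text : String) (kind : Int) (out : Bool) : Prop := out = IfBlackName_alt black_name_list text kind
instance (black_name_list : List String) (text : String) (kind : Int) (out : Bool) : Decidable (Spec_IfBlackName black_name_list text kind out) := by unfold Spec_IfBlackName; infer_instance

-- ===== CLAIM (what is proved, stated in full; the proofs are below) =====
def Claim_equal_IfBlackName : Prop := ∀ (black_name_list : List String) (text : String) (kind : Int), Dom_IfBlackName black_name_list text kind → Spec_IfBlackName black_name_list text kind (IfBlackName black_name_list text kind)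

-- ===== LEMMAS AND PROOFS =====

-- A's early-return scan is the disjunction of the per-entry tests.
lemma ifBlackName_eq_any (bl : List String) (text : String) (kind : Int) :
    IfBlackName bl text kind =
      bl.any (fun temp =>
        (kind == 1 && text == temp) ||
        (kind == 2 && PySem.Str.find text temp != -1) ||
        (kind == 3 && PySem.Str.startswith text temp)) := by
  induction bl with
  | nil => simp [IfBlackName]
  | cons temp rest ih =>
    rw [IfBlackName, List.any_cons, ih]
    cases (kind == 1 && text == temp) <;>
    cases (kind == 2 && PySem.Str.find text temp != -1) <;>
    cases (kind == 3 && PySem.Str.startswith text temp) <;>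
    simp

-- a [take-of-drop] slice of the text is an infix, and every infix arises that way
lemma infix_iff_slice (s t : List Char) :
    t <:+: s ↔ ∃ i j : Nat, i ≤ j ∧ j ≤ s.length ∧ (s.drop i).take (j - i) = t := by
  constructor
  · rintro ⟨pre, suf, rfl⟩
    refine ⟨pre.length, pre.length + t.length, Nat.le_add_right _ _, by simp, ?_⟩
    simp
  · rintro ⟨i, j, _, _, rfl⟩
    exact (List.take_prefix _ _).isInfix.trans (List.drop_suffix _ _).isInfix

lemma prefix_iff_take (s t : List Char) :
    t <+: s ↔ ∃ i : Nat, i ≤ s.length ∧ s.take i = t := by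
  constructor
  · intro h
    exact ⟨t.length, h.length_le, (List.prefix_iff_eq_take.mp h).symm⟩
  · rintro ⟨i, _, rfl⟩
    exact List.take_prefix _ _

lemma IfBlackName_eq_alt (bl : List String) (text : String) (kind : Int) :
    IfBlackName bl text kind = IfBlackName_alt bl text kind := by
  rw [ifBlackName_eq_any, Bool.eq_iff_iff]
  by_cases h1 : kind = 1
  · subst h1
    simp [IfBlackName_alt, List.any_eq_true, PySem.Set.mem_ofList]
  · by_cases h2 : kind = 2
    · subst h2
      simp [IfBlackName_alt, List.any_eq_true, PySem.List.mem_pyRange_one,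
        PySem.Set.mem_ofList]
      constructor
      · rintro ⟨temp, hm, hf⟩
        have hinf : temp.toList <:+: text.toList :=
          (PySem.Chars.find_ne_neg_one_iff _ _).1 hf
        obtain ⟨i, j, hij, hjl, hsl⟩ := (infix_iff_slice text.toList temp.toList).mp hinf
        rw [String.length_toList] at hjl
        refine ⟨(i : Int), ⟨by omega, by omega⟩, (j : Int), ⟨by exact_mod_cast hij, by omega⟩, ?_⟩
        rw [PySem.List.slice_natCast, hsl, String.ofList_toList]
        exact hm
      · rintro ⟨i, ⟨hi0, _⟩, j, ⟨hij, hjn⟩, hm⟩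
        refine ⟨_, hm, (PySem.Chars.find_ne_neg_one_iff _ _).2 ?_⟩
        rw [String.toList_ofList]
        have hi : i = ((i.toNat : Nat) : Int) := by omega
        have hj : j = ((j.toNat : Nat) : Int) := by omega
        rw [hi, hj, PySem.List.slice_natCast]
        
        exact (infix_iff_slice text.toList _).mpr
          ⟨i.toNat, j.toNat, by omega, by rw [String.length_toList]; omega, rfl⟩
    · by_cases h3 : kind = 3
      · subst h3
        simp [IfBlackName_alt, List.any_eq_true, PySem.List.mem_pyRange_one,
          PySem.Set.mem_ofList]
        constructor
        · rintro ⟨temp, hm, hs⟩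
          have hpre : temp.toList <+: text.toList :=
            (PySem.Chars.startswith_iff _ _).1 hs
          obtain ⟨i, hil, hti⟩ := (prefix_iff_take text.toList temp.toList).mp hpre
          rw [String.length_toList] at hil
          refine ⟨(i : Int), ⟨by omega, by omega⟩, ?_⟩
          rw [PySem.List.slice_to_natCast, hti, String.ofList_toList]
          exact hm
        · rintro ⟨i, ⟨hi0, _⟩, hm⟩
          refine ⟨_, hm, (PySem.Chars.startswith_iff _ _).2 ?_⟩
          rw [String.toList_ofList, PySem.List.slice_to text.toList hi0]
          exact List.take_prefix _ _
      · have e1 : (kind == 1) = false := by simp [h1]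
        have e2 : (kind == 2) = false := by simp [h2]
        have e3 : (kind == 3) = false := by simp [h3]
        simp [IfBlackName_alt, e1, e2, e3]

-- ===== VERDICT =====
theorem IfBlackName_spec : Claim_equal_IfBlackName := by
  intro bl text kind _
  unfold Spec_IfBlackName
  exact IfBlackName_eq_alt bl text kind
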